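-- pv_equiv track=rewrite | github.com/Dayti-0/Auto-Apply-Keybinds-to-Myau-Configs | mybind.py | apply_binds
-- ===== SOURCE A (Python) =====
-- def apply_binds(src_cfg, dst_cfg):
--     """
--     Remove all 'key' fields from dst_cfg, then copy 'key' fields from src_cfg
--     for modules present in both.
--     """
--     # 1) remove
--     for module, params in list(dst_cfg.items()):
--         if isinstance(params, dict):
--             params.pop("key", None)
--
--     # 2) copy
--     for module, src_params in src_cfg.items():
--         if module in dst_cfg and isinstance(src_params, dict) and "key" in src_params:
--             if not isinstance(dst_cfg[module], dict):
--                 dst_cfg[module] = {}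
--             dst_cfg[module]["key"] = src_params["key"]
--
--     return dst_cfg
-- ===== SOURCE B (Python) =====
-- def apply_binds(src_cfg, dst_cfg):
--     """Pure rebuild instead of in-place editing: collect the src 'key's once into a
--     small map, then emit a fresh config via one dict comprehension over dst_cfg.
--     (Return value only: unlike A, this does not mutate dst_cfg or its inner dicts.)"""
--     src_keys = {m: p["key"] for m, p in src_cfg.items()
--                 if isinstance(p, dict) and "key" in p}
--     return {m: ({k: v for k, v in p.items() if k != "key"}
--                 | ({"key": src_keys[m]} if m in src_keys else {}))
--             for m, p in dst_cfg.items()}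
-- ===== Notes on version B (the rewrite author's own statement) =====
-- stated objective: alternative
-- what changed: A edits dst_cfg in place in two passes (strip every 'key', then walk src_cfg copying 'key's back); B is a pure two-phase rebuild: it first condenses src_cfg into a module->key map, then produces the whole result in a single dict comprehension over dst_cfg, appending the looked-up 'key'; return-value equivalence only, since A mutates dst_cfg and its inner dicts while B builds fresh ones.
import Mathlib
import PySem

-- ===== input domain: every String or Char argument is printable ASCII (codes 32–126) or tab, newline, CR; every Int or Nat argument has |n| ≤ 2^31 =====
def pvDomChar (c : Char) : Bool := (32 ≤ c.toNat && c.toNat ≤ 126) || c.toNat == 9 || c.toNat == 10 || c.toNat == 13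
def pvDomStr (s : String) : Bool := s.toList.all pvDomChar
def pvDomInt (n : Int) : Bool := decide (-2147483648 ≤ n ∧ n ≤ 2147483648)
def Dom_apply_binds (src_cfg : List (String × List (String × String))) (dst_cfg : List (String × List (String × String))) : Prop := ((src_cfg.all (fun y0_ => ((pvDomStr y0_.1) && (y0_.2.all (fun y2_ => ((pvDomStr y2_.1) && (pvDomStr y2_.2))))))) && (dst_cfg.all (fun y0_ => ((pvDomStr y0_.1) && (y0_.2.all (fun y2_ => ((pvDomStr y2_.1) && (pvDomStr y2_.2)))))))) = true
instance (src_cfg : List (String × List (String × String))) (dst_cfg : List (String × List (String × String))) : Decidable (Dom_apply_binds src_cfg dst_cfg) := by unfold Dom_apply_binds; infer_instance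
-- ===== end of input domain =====

-- B replaces A's in-place, two-pass edit of dst_cfg by a pure rebuild (condense src_cfg into a
-- module→key map, then one dict comprehension over dst_cfg); return-value equivalence only —
-- A mutates dst_cfg and its inner dicts, B constructs fresh ones with the same contents.

-- ===== PORT A =====
-- representation bridge: the dict[str, dict[str, str]] arguments as insertion-order PySem.Dicts
def pvToDict (cfg : List (String × List (String × String))) : PySem.Dict String (PySem.Dict String String) :=
  PySem.Dict.ofList (cfg.map (fun p => (p.1, PySem.Dict.ofList p.2)))

def pvFromDict (d : PySem.Dict String (PySem.Dict String String)) : List (String × List (String × String)) :=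
  d.items.map (fun p => (p.1, p.2.items))

def apply_binds (src_cfg : List (String × List (String × String))) (dst_cfg : List (String × List (String × String))) : List (String × List (String × String)) :=
  let srcD := pvToDict src_cfg
  let dstD := pvToDict dst_cfg
  -- 1) remove: for module, params in list(dst_cfg.items()): params.pop("key", None)
  --    (params is always a dict on this typed domain, so the isinstance guard is always true;
  --     the in-place pop is the overwrite of module's slot with the erased dict)
  let d1 := dstD.items.foldl (fun d p => d.insert p.1 (p.2.erase "key")) dstD
  -- 2) copy: for module, src_params in src_cfg.items(): if module in dst_cfg and "key" in src_params: ...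
  --    (the 'not isinstance(dst_cfg[module], dict)' coercion branch cannot fire on this typed domain)
  let d2 := srcD.items.foldl (fun d p =>
      if d.contains p.1 && p.2.contains "key" then
        d.insert p.1 ((d.getD p.1 PySem.Dict.empty).insert "key" (p.2.getD "key" ""))
      else d) d1
  pvFromDict d2

-- ===== PORT B =====
def apply_binds_alt (src_cfg : List (String × List (String × String))) (dst_cfg : List (String × List (String × String))) : List (String × List (String × String)) :=
  -- src_keys = {m: p["key"] for m, p in src_cfg.items() if isinstance(p, dict) and "key" in p}
  -- (the membership test + subscript is the option-valued get?; isinstance is true on this typed domain)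
  let srcKeys : List (String × String) :=
    (pvToDict src_cfg).items.filterMap (fun p => (p.2.get? "key").map (fun v => (p.1, v)))
  -- return {m: {k: v for k, v in p.items() if k != "key"} | ({"key": src_keys[m]} if m in src_keys else {})
  --         for m, p in dst_cfg.items()}
  -- ('|' with a singleton on a dict lacking "key" is insert; 'm in src_keys'/'src_keys[m]' is lookup)
  (pvToDict dst_cfg).items.map (fun p =>
    let cleaned := PySem.Dict.ofList (p.2.items.filter (fun kv => !(kv.1 == "key")))
    (p.1, (match srcKeys.lookup p.1 with
           | some v => cleaned.insert "key" v
           | none => cleaned).items))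

-- ===== PRECONDITION & SPEC =====
def Spec_apply_binds (src_cfg : List (String × List (String × String))) (dst_cfg : List (String × List (String × String))) (out : List (String × List (String × String))) : Prop := out = apply_binds_alt src_cfg dst_cfg
instance (src_cfg : List (String × List (String × String))) (dst_cfg : List (String × List (String × String))) (out : List (String × List (String × String))) : Decidable (Spec_apply_binds src_cfg dst_cfg out) := by unfold Spec_apply_binds; infer_instance

-- ===== CLAIM (what is proved, stated in full; the proofs are below) =====
def Claim_equal_apply_binds : Prop := ∀ (src_cfg : List (String × List (String × String))) (dst_cfg : List (String × List (String × String))), Dom_apply_binds src_cfg dst_cfg → Spec_apply_binds src_cfg dst_cfg (apply_binds src_cfg dst_cfg)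

-- ===== LEMMAS AND PROOFS =====

-- get? is the first match: the exact pair find? returns
theorem pv_find?_of_get?_eq_some {V : Type} (d : PySem.Dict String V) (k : String) (v : V)
    (h : d.get? k = some v) : d.items.find? (fun p => p.1 == k) = some (k, v) := by
  simp only [PySem.Dict.get?, Option.map_eq_some_iff] at h
  obtain ⟨p, hp, hv⟩ := h
  have hk := List.find?_some hp
  simp only [beq_iff_eq] at hk
  rw [hp]
  cases p; simp_all

theorem pv_find?_of_get?_eq_none {V : Type} (d : PySem.Dict String V) (k : String)
    (h : d.get? k = none) : d.items.find? (fun p => p.1 == k) = none := by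
  simp only [PySem.Dict.get?, Option.map_eq_none_iff] at h
  exact h

-- a dict built from a list whose keys are already distinct is that list
theorem pv_ofList_of_nodup {V : Type} (l : List (String × V)) (h : (l.map (·.1)).Nodup) :
    PySem.Dict.ofList l = PySem.Dict.mk l := by
  have := PySem.Dict.items_foldl_insert_fresh l (·.1) (·.2) PySem.Dict.empty
    (fun a _ => PySem.Dict.contains_empty _) h
  apply PySem.Dict.ext
  simpa [PySem.Dict.ofList, PySem.Dict.update, PySem.Dict.empty] using this

-- fold "d.insert p.1 (E p)" over a list with distinct keys: the resulting lookup
theorem pv_get?_foldl_insertE {V : Type} (E : String × V → V) (l : List (String × V))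
    (d : PySem.Dict String V) (k : String) (hnd : (l.map (·.1)).Nodup) :
    (l.foldl (fun d p => d.insert p.1 (E p)) d).get? k =
      match l.find? (fun p => p.1 == k) with
      | some p => some (E p)
      | none => d.get? k := by
  induction l generalizing d with
  | nil => simp
  | cons p l ih =>
    simp only [List.map_cons, List.nodup_cons] at hnd
    rw [List.foldl_cons, ih _ hnd.2, List.find?_cons]
    by_cases hk : p.1 = k
    · subst hk
      have hnone : l.find? (fun q => q.1 == p.1) = none := by
        rw [List.find?_eq_none]
        intro q hq
        simp only [beq_iff_eq]
        intro hqe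
        exact hnd.1 (hqe ▸ List.mem_map_of_mem hq)
      simp [hnone, PySem.Dict.get?_insert_self]
    · have hbeq : (p.1 == k) = false := by simp [hk]
      simp only [hbeq]
      cases hfind : l.find? (fun q => q.1 == k) with
      | some q => simp
      | none => simp [PySem.Dict.get?_insert_of_ne _ _ (Ne.symm hk)]

theorem pv_keys_foldl_insertE {V : Type} (E : String × V → V) (l : List (String × V))
    (d : PySem.Dict String V) (h : ∀ p ∈ l, p.1 ∈ d.keys) :
    (l.foldl (fun d p => d.insert p.1 (E p)) d).keys = d.keys := by
  induction l generalizing d with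
  | nil => rfl
  | cons p l ih =>
    have hc : d.contains p.1 = true :=
      (PySem.Dict.contains_iff_mem_keys d p.1).2 (h p (List.mem_cons_self))
    have hk := PySem.Dict.keys_insert_of_contains d (E p) hc
    rw [List.foldl_cons, ih]
    · exact hk
    · intro q hq; rw [hk]; exact h q (List.mem_cons_of_mem _ hq)

-- A's copy pass: keys are preserved and the resulting lookup has a closed form
theorem pv_keys_pass2 (l : List (String × PySem.Dict String String))
    (d : PySem.Dict String (PySem.Dict String String)) :
    (l.foldl (fun d p =>
      if d.contains p.1 && p.2.contains "key" then
        d.insert p.1 ((d.getD p.1 PySem.Dict.empty).insert "key" (p.2.getD "key" ""))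
      else d) d).keys = d.keys := by
  induction l generalizing d with
  | nil => rfl
  | cons p l ih =>
    rw [List.foldl_cons, ih]
    by_cases hc : (d.contains p.1 && p.2.contains "key") = true
    · simp only [hc, if_true]
      exact PySem.Dict.keys_insert_of_contains d _ (Bool.and_elim_left hc)
    · simp only [Bool.not_eq_true] at hc
      simp [hc]

theorem pv_get?_pass2 (l : List (String × PySem.Dict String String))
    (d : PySem.Dict String (PySem.Dict String String)) (k : String)
    (hnd : (l.map (·.1)).Nodup) :
    (l.foldl (fun d p =>
      if d.contains p.1 && p.2.contains "key" then
        d.insert p.1 ((d.getD p.1 PySem.Dict.empty).insert "key" (p.2.getD "key" ""))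
      else d) d).get? k =
      match l.find? (fun p => p.1 == k) with
      | some p => if d.contains k && p.2.contains "key" then
            some ((d.getD k PySem.Dict.empty).insert "key" (p.2.getD "key" ""))
          else d.get? k
      | none => d.get? k := by
  induction l generalizing d with
  | nil => simp
  | cons p l ih =>
    simp only [List.map_cons, List.nodup_cons] at hnd
    rw [List.foldl_cons, ih _ hnd.2, List.find?_cons]
    by_cases hk : p.1 = k
    · subst hk
      have hnone : l.find? (fun q => q.1 == p.1) = none := by
        rw [List.find?_eq_none]
        intro q hq
        simp only [beq_iff_eq]
        intro hqe
        exact hnd.1 (hqe ▸ List.mem_map_of_mem hq)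
      simp only [BEq.rfl, hnone]
      by_cases hc : (d.contains p.1 && p.2.contains "key") = true
      · simp [hc, PySem.Dict.get?_insert_self]
      · simp only [Bool.not_eq_true] at hc
        simp [hc]
    · have hbeq : (p.1 == k) = false := by simp [hk]
      simp only [hbeq]
      by_cases hc : (d.contains p.1 && p.2.contains "key") = true
      · have hget : (d.insert p.1 ((d.getD p.1 PySem.Dict.empty).insert "key" (p.2.getD "key" ""))).get? k = d.get? k :=
          PySem.Dict.get?_insert_of_ne _ _ (Ne.symm hk)
        have hcont : (d.insert p.1 ((d.getD p.1 PySem.Dict.empty).insert "key" (p.2.getD "key" ""))).contains k = d.contains k := by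
          rw [PySem.Dict.contains_eq_isSome_get?, PySem.Dict.contains_eq_isSome_get?, hget]
        have hgetD : (d.insert p.1 ((d.getD p.1 PySem.Dict.empty).insert "key" (p.2.getD "key" ""))).getD k PySem.Dict.empty = d.getD k PySem.Dict.empty := by
          rw [PySem.Dict.getD_eq_get?_getD _ k, hget, ← PySem.Dict.getD_eq_get?_getD]
        simp only [hc, if_true, hget, hcont, hgetD]
      · simp only [Bool.not_eq_true] at hc
        simp [hc]

-- every value stored in pvToDict cfg has distinct keys
theorem pv_values_nodup_all (cfg : List (String × List (String × String))) :
    ∀ w ∈ (pvToDict cfg).values, w.keys.Nodup := by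
  unfold pvToDict PySem.Dict.ofList PySem.Dict.update
  induction cfg using List.reverseRecOn with
  | nil => simp [PySem.Dict.empty, PySem.Dict.values]
  | append_singleton l p ih =>
    rw [List.map_append, List.foldl_append]
    intro w hw
    rcases PySem.Dict.mem_values_insert _ _ _ _ hw with rfl | hw'
    · exact PySem.Dict.nodup_keys_ofList _
    · exact ih w hw'

theorem pv_values_nodup (cfg : List (String × List (String × String))) (k : String)
    (pd : PySem.Dict String String) (h : (pvToDict cfg).get? k = some pd) : pd.keys.Nodup := by
  have hmem : pd ∈ (pvToDict cfg).values :=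
    List.mem_map_of_mem (f := (·.2)) (PySem.Dict.mem_items_of_get?_eq_some _ h)
  exact pv_values_nodup_all cfg pd hmem

-- erase is literally a filter of the items
theorem pv_erase_eq_mk (pd : PySem.Dict String String) :
    pd.erase "key" = PySem.Dict.mk (pd.items.filter (fun kv => !(kv.1 == "key"))) := by
  cases pd; rfl

-- B's comprehension equals A's in-place pop
theorem pv_cleaned_eq_erase (pd : PySem.Dict String String) (h : pd.keys.Nodup) :
    PySem.Dict.ofList (pd.items.filter (fun kv => !(kv.1 == "key"))) = pd.erase "key" := by
  have hsub : List.Sublist ((pd.items.filter (fun kv => !(kv.1 == "key"))).map (·.1)) (pd.items.map (·.1)) :=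
    List.Sublist.map _ List.filter_sublist
  have hnd := List.Nodup.sublist hsub h
  rw [pv_ofList_of_nodup _ hnd, pv_erase_eq_mk]

-- a lookup in B's src_keys map when the key is not among the remaining modules
theorem pv_lookup_srcKeys_none (l : List (String × PySem.Dict String String)) (k : String)
    (h : k ∉ l.map (·.1)) :
    (l.filterMap (fun p => (p.2.get? "key").map (fun v => (p.1, v)))).lookup k = none := by
  induction l with
  | nil => rfl
  | cons p l ih =>
    simp only [List.map_cons, List.mem_cons, not_or] at h
    rw [List.filterMap_cons]
    cases hv : p.2.get? "key" with
    | none => simpa using ih h.2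
    | some v =>
      simp only [Option.map_some]
      have hne : (k == p.1) = false := by simp [h.1]
      simp only [List.lookup, hne]
      exact ih h.2
    
-- B's src_keys lookup in closed form: the src module's 'key', if any
theorem pv_lookup_srcKeys (l : List (String × PySem.Dict String String)) (k : String)
    (hnd : (l.map (·.1)).Nodup) :
    (l.filterMap (fun p => (p.2.get? "key").map (fun v => (p.1, v)))).lookup k =
      ((l.find? (fun p => p.1 == k)).map (·.2)).bind (fun sp => sp.get? "key") := by
  induction l with
  | nil => rfl
  | cons p l ih =>
    simp only [List.map_cons, List.nodup_cons] at hnd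
    rw [List.filterMap_cons, List.find?_cons]
    by_cases hk : p.1 = k
    · subst hk
      have hnot : p.1 ∉ l.map (·.1) := hnd.1
      cases hv : p.2.get? "key" with
      | none =>
        simp only [Option.map_none, BEq.rfl]
        calc (l.filterMap (fun p => (p.2.get? "key").map (fun v => (p.1, v)))).lookup p.1
            = none := pv_lookup_srcKeys_none l p.1 hnot
          _ = ((some p).map (·.2)).bind (fun sp => sp.get? "key") := by simp [hv]
      | some v =>
        simp only [Option.map_some, BEq.rfl, List.lookup, BEq.rfl]
        simp [hv]
    · have hbeq : (p.1 == k) = false := by simp [hk]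
      have hbek : (k == p.1) = false := by simp [Ne.symm hk]
      cases hv : p.2.get? "key" with
      | none => simp only [Option.map_none, hbeq]; exact ih hnd.2
      | some v =>
        simp only [Option.map_some, hbeq, List.lookup, hbek]
        exact ih hnd.2

-- the heart: A's two in-place passes and B's rebuilt dict agree module by module
theorem pv_main (S D0 : PySem.Dict String (PySem.Dict String String))
    (hndS : S.keys.Nodup) (hndD : D0.keys.Nodup)
    (hv : ∀ k pd, D0.get? k = some pd → pd.keys.Nodup) :
    pvFromDict (S.items.foldl (fun d p =>
        if d.contains p.1 && p.2.contains "key" then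
          d.insert p.1 ((d.getD p.1 PySem.Dict.empty).insert "key" (p.2.getD "key" ""))
        else d)
      (D0.items.foldl (fun d p => d.insert p.1 (p.2.erase "key")) D0))
    = D0.items.map (fun p =>
        let cleaned := PySem.Dict.ofList (p.2.items.filter (fun kv => !(kv.1 == "key")))
        (p.1, (match (S.items.filterMap (fun q : String × PySem.Dict String String => (q.2.get? "key").map (fun v => (q.1, v)))).lookup p.1 with
               | some v => cleaned.insert "key" v
               | none => cleaned).items)) := by
  have hndSl : (S.items.map (·.1)).Nodup := hndS
  have hndDl : (D0.items.map (·.1)).Nodup := hndD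
  have hmemD : ∀ p ∈ D0.items, p.1 ∈ D0.keys := fun p hp => PySem.Dict.mem_keys_of_mem_items _ hp
  set d1 := D0.items.foldl (fun d p => d.insert p.1 (p.2.erase "key")) D0 with hd1
  set d2 := S.items.foldl (fun d p =>
        if d.contains p.1 && p.2.contains "key" then
          d.insert p.1 ((d.getD p.1 PySem.Dict.empty).insert "key" (p.2.getD "key" ""))
        else d) d1 with hd2
  have keys1 : d1.keys = D0.keys := pv_keys_foldl_insertE _ _ _ hmemD
  have keys2 : d2.keys = D0.keys := (pv_keys_pass2 _ _).trans keys1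
  unfold pvFromDict
  rw [PySem.Dict.items_eq_map_keys d2 (keys2 ▸ hndD) PySem.Dict.empty,
      PySem.Dict.items_eq_map_keys D0 hndD PySem.Dict.empty, keys2,
      List.map_map, List.map_map]
  apply List.map_congr_left
  intro k hk
  obtain ⟨pd, hpd⟩ : ∃ pd, D0.get? k = some pd := by
    cases hD : D0.get? k with
    | none => exact absurd ((PySem.Dict.get?_eq_none_iff_not_mem_keys D0 k).1 hD) (by simp [hk])
    | some pd => exact ⟨pd, rfl⟩
  have hfindD := pv_find?_of_get?_eq_some D0 k pd hpd
  have d1get : d1.get? k = some (pd.erase "key") := by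
    rw [hd1, pv_get?_foldl_insertE _ _ _ _ hndDl, hfindD]
  have hD0getD : D0.getD k PySem.Dict.empty = pd := PySem.Dict.getD_of_get?_eq_some _ _ hpd
  have hclean : PySem.Dict.ofList (pd.items.filter (fun kv => !(kv.1 == "key"))) = pd.erase "key" :=
    pv_cleaned_eq_erase pd (hv k pd hpd)
  have hlook := pv_lookup_srcKeys S.items k hndSl
  have hd2get : d2.getD k PySem.Dict.empty =
      (match (S.items.filterMap (fun q => (q.2.get? "key").map (fun v => (q.1, v)))).lookup k with
       | some v => (pd.erase "key").insert "key" v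
       | none => pd.erase "key") := by
    rw [PySem.Dict.getD_eq_get?_getD, hd2, pv_get?_pass2 _ _ _ hndSl, hlook]
    cases hS : S.get? k with
    | none =>
      rw [pv_find?_of_get?_eq_none S k hS]
      simp [d1get]
    | some sp =>
      rw [pv_find?_of_get?_eq_some S k sp hS]
      have hc1 : d1.contains k = true := by
        rw [PySem.Dict.contains_eq_isSome_get?, d1get]; rfl
      have hgD : d1.getD k PySem.Dict.empty = pd.erase "key" := by
        rw [PySem.Dict.getD_eq_get?_getD, d1get]; rfl
      cases hspc : sp.contains "key" with
      | true =>
        have : sp.get? "key" = some (sp.getD "key" "") := by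
          rw [PySem.Dict.contains_eq_isSome_get?] at hspc
          rw [PySem.Dict.getD_eq_get?_getD]
          cases h : sp.get? "key" with
          | none => rw [h] at hspc; simp at hspc
          | some v => rfl
        simp [hc1, hspc, hgD, this]
      | false =>
        have : sp.get? "key" = none := by
          rw [PySem.Dict.contains_eq_isSome_get?] at hspc
          cases h : sp.get? "key" with
          | none => rfl
          | some v => rw [h] at hspc; simp at hspc
        simp [hc1, hspc, this, d1get]
  simp only [Function.comp, hD0getD, hd2get, hclean]

-- ===== VERDICT (by name: the statement is the Claim_ definition above) =====
theorem apply_binds_spec : Claim_equal_apply_binds := by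
  intro src_cfg dst_cfg _
  show apply_binds src_cfg dst_cfg = apply_binds_alt src_cfg dst_cfg
  have hndS : (pvToDict src_cfg).keys.Nodup := by
    unfold pvToDict; exact PySem.Dict.nodup_keys_ofList _
  have hndD : (pvToDict dst_cfg).keys.Nodup := by
    unfold pvToDict; exact PySem.Dict.nodup_keys_ofList _
  exact pv_main (pvToDict src_cfg) (pvToDict dst_cfg) hndS hndD (pv_values_nodup dst_cfg)
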